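-- pv_equiv track=rewrite | github.com/CybercentreCanada/assemblyline-base | assemblyline/common/classification.py | _build_combinations
-- ===== SOURCE A (Python) =====
-- import itertools
-- from typing import Set, List, KeysView, Union, Dict, Optional, Tuple, Any
--
-- def _build_combinations(items: Set, separator: str = "/", solitary_display: Optional[Dict] = None) -> Set:
--     if solitary_display is None:
--         solitary_display = {}
--
--     out = {""}
--     for i in items:
--         others = [x for x in items if x != i]
--         for x in range(len(others)+1):
--             for c in itertools.combinations(others, x):
--                 value = separator.join(sorted([i]+list(c)))
--                 out.add(solitary_display.get(value, value))
--
--     return out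
-- ===== SOURCE B (Python) =====
-- import itertools
--
--
-- def _build_combinations(items, separator="/", solitary_display=None):
--     if solitary_display is None:
--         solitary_display = {}
--
--     out = {""}
--
--     def go(seq):
--         if not seq:
--             return
--         head, rest = seq[0], seq[1:]
--         for x in range(len(rest) + 1):
--             for c in itertools.combinations(rest, x):
--                 value = separator.join(sorted((head,) + c))
--                 out.add(solitary_display.get(value, value))
--         go(rest)
--
--     go(list(items))
--     return out
-- ===== Notes on version B (the rewrite author's own statement) =====
-- stated objective: faster
-- what changed: A rescans the whole set for every element (filter out i, then all combinations of the other n-1 items, generating every subset n times); B recurses down the list, combining each element only with the items after it, so every subset is generated exactly once.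
import Mathlib
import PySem

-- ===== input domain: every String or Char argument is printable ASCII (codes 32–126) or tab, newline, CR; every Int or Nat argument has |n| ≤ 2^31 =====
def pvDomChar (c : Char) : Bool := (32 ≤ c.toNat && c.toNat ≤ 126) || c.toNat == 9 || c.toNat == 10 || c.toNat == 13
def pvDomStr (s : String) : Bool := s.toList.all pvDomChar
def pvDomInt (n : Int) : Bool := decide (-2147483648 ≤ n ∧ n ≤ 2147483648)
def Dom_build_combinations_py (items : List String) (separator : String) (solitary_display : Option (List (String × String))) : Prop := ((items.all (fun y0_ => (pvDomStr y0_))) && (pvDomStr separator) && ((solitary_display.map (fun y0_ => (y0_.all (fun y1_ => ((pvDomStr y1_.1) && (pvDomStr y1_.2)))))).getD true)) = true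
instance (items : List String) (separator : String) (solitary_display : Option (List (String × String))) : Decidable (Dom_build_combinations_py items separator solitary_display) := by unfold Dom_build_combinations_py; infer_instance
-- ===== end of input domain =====

-- B replaces A's per-element rescan of the whole set (filter + combinations over n-1 items for
-- each of the n elements) by one recursion that peels the first element off and only combines it
-- with the REST of the list, so every subset is generated once: measurably faster (constant/linear factor).

-- ===== PORT A =====
def build_combinations_py (items : List String) (separator : String) (solitary_display : Option (List (String × String))) : List String :=
  let sd : PySem.Dict String String := PySem.Dict.mk (solitary_display.getD [])
  items.foldl
    (fun out i =>
      let others := items.filter (fun x => x != i)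
      (List.range (others.length + 1)).foldl
        (fun out x =>
          (PySem.List.combinations others x).foldl
            (fun out c =>
              let value := PySem.Str.join separator (PySem.List.sorted (i :: c) (fun s => s) false)
              PySem.Set.add out (PySem.Dict.getD sd value value))
            out)
        out)
    (PySem.Set.ofList [""])

-- ===== PORT B =====
-- inner body of Source B's go: combine `head` with every combination of the elements AFTER it
def pvAltHead (separator : String) (sd : PySem.Dict String String) (head : String) (rest : List String) (out : PySem.Set String) : PySem.Set String :=
  (List.range (rest.length + 1)).foldl
    (fun out x =>
      (PySem.List.combinations rest x).foldl
        (fun out c =>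
          let value := PySem.Str.join separator (PySem.List.sorted (head :: c) (fun s => s) false)
          PySem.Set.add out (PySem.Dict.getD sd value value))
        out)
    out

-- Source B's recursive go(seq)
def pvAltGo (separator : String) (sd : PySem.Dict String String) : List String → PySem.Set String → PySem.Set String
  | [], out => out
  | head :: rest, out => pvAltGo separator sd rest (pvAltHead separator sd head rest out)

def build_combinations_py_alt (items : List String) (separator : String) (solitary_display : Option (List (String × String))) : List String :=
  let sd : PySem.Dict String String := PySem.Dict.mk (solitary_display.getD [])
  pvAltGo separator sd items (PySem.Set.ofList [""])

-- ===== PRECONDITION & SPEC =====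
-- items is a Python set; under the type convention its List port holds the set's DISTINCT elements,
-- so Pre_ states that well-formedness (Nodup) — it excludes no actual set argument.
def Pre_build_combinations_py (items : List String) (separator : String) (solitary_display : Option (List (String × String))) : Prop :=
  items.Nodup
instance (items : List String) (separator : String) (solitary_display : Option (List (String × String))) : Decidable (Pre_build_combinations_py items separator solitary_display) := by unfold Pre_build_combinations_py; infer_instance

def pvWitness_build_combinations_py : List String × String × (Option (List (String × String))) :=
  (["a", "b", "c"], "/", some [("a", "solo-a")])

def Spec_build_combinations_py (items : List String) (separator : String) (solitary_display : Option (List (String × String))) (out : List String) : Prop := out = build_combinations_py_alt items separator solitary_display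
instance (items : List String) (separator : String) (solitary_display : Option (List (String × String))) (out : List String) : Decidable (Spec_build_combinations_py items separator solitary_display out) := by unfold Spec_build_combinations_py; infer_instance

-- ===== CLAIM (what is proved, stated in full; the proofs are below) =====
def Claim_equal_build_combinations_py : Prop := ∀ (items : List String) (separator : String) (solitary_display : Option (List (String × String))), Dom_build_combinations_py items separator solitary_display → Pre_build_combinations_py items separator solitary_display → Spec_build_combinations_py items separator solitary_display (build_combinations_py items separator solitary_display)

-- ===== LEMMAS AND PROOFS =====

-- the joined-and-displayed value a subset contributes
def pvVal (sep : String) (i : String) (c : List String) : String :=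
  PySem.Str.join sep (PySem.List.sorted (i :: c) (fun s => s) false)

def pvAdd (sd : PySem.Dict String String) (out : PySem.Set String) (v : String) : PySem.Set String :=
  PySem.Set.add out (PySem.Dict.getD sd v v)

-- all combinations of `pool`, every size, in the order both ports enumerate them
def pvSubs (pool : List String) : List (List String) :=
  (List.range (pool.length + 1)).flatMap (PySem.List.combinations pool)

-- both ports' inner double loop, flattened over pvSubs
def pvInner (sep : String) (sd : PySem.Dict String String) (i : String) (pool : List String) (out : PySem.Set String) : PySem.Set String :=
  (pvSubs pool).foldl (fun out c => pvAdd sd out (pvVal sep i c)) out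

lemma pvInner_eq (sep : String) (sd : PySem.Dict String String) (i : String) (pool : List String) (out : PySem.Set String) :
    (List.range (pool.length + 1)).foldl
      (fun out x =>
        (PySem.List.combinations pool x).foldl
          (fun out c =>
            let value := PySem.Str.join sep (PySem.List.sorted (i :: c) (fun s => s) false)
            PySem.Set.add out (PySem.Dict.getD sd value value))
          out)
      out
    = pvInner sep sd i pool out := by
  simp only [pvInner, pvSubs, List.foldl_flatMap, pvAdd, pvVal]

lemma mem_pvSubs {pool : List String} {c : List String} : c ∈ pvSubs pool ↔ c.Sublist pool := by
  unfold pvSubs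
  simp only [List.mem_flatMap, List.mem_range, PySem.List.mem_combinations_iff]
  constructor
  · rintro ⟨x, -, hs, -⟩; exact hs
  · intro hs; exact ⟨c.length, by have := hs.length_le; omega, hs, rfl⟩

-- A's `others` list for the element at position |pre| of a duplicate-free list
lemma pvFilter_others (pre rest : List String) (h : String)
    (hp : h ∉ pre) (hr : h ∉ rest) :
    (pre ++ h :: rest).filter (fun x => x != h) = pre ++ rest := by
  have e1 : pre.filter (fun x => x != h) = pre := by
    apply List.filter_eq_self.mpr
    intro a ha
    simp only [bne_iff_ne, ne_eq]
    exact fun e => hp (e ▸ ha)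
  have e2 : rest.filter (fun x => x != h) = rest := by
    apply List.filter_eq_self.mpr
    intro a ha
    simp only [bne_iff_ne, ne_eq]
    exact fun e => hr (e ▸ ha)
  rw [List.filter_append, List.filter_cons]
  simp [e1, e2]

lemma pvCombinations_filter (pre rest : List String) (r : Nat)
    (hd : ∀ a ∈ pre, a ∉ rest) :
    (PySem.List.combinations (pre ++ rest) r).filter (fun c => c.all (fun a => decide (a ∈ rest)))
      = PySem.List.combinations rest r := by
  induction pre generalizing r with
  | nil =>
    simp only [List.nil_append]
    apply List.filter_eq_self.mpr
    intro c hc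
    have hsub := PySem.List.sublist_of_mem_combinations hc
    simp only [List.all_eq_true, decide_eq_true_eq]
    exact fun a ha => hsub.subset ha
  | cons a pre ih =>
    have ha : a ∉ rest := hd a List.mem_cons_self
    have hd' : ∀ b ∈ pre, b ∉ rest := fun b hb => hd b (List.mem_cons_of_mem _ hb)
    cases r with
    | zero => simp [PySem.List.combinations_zero]
    | succ r =>
      rw [List.cons_append, PySem.List.combinations_cons_succ, List.filter_append, List.filter_map]
      have e1 : (PySem.List.combinations (pre ++ rest) r).filter
          ((fun c => c.all fun a => decide (a ∈ rest)) ∘ (a :: ·)) = [] := by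
        apply List.filter_eq_nil_iff.mpr
        intro c _
        simp [ha]
      rw [e1]
      simp only [List.map_nil, List.nil_append]
      exact ih (r + 1) hd'

lemma pvSubs_filter (pre rest : List String)
    (hd : ∀ a ∈ pre, a ∉ rest) :
    (pvSubs (pre ++ rest)).filter (fun c => c.all (fun a => decide (a ∈ rest))) = pvSubs rest := by
  unfold pvSubs
  rw [List.filter_flatMap]
  have e : (fun x => (PySem.List.combinations (pre ++ rest) x).filter
      (fun c => c.all fun a => decide (a ∈ rest))) = fun x => PySem.List.combinations rest x :=
    funext fun r => pvCombinations_filter pre rest r hd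
  rw [e]
  have hlen : (pre ++ rest).length + 1 = (rest.length + 1) + pre.length := by
    simp [List.length_append]; omega
  rw [hlen, List.range_add, List.flatMap_append]
  have e2 : ((List.range pre.length).map (fun k => rest.length + 1 + k)).flatMap
      (PySem.List.combinations rest) = [] := by
    apply List.flatMap_eq_nil_iff.mpr
    intro x hx
    simp only [List.mem_map, List.mem_range] at hx
    obtain ⟨k, -, rfl⟩ := hx
    exact PySem.List.combinations_eq_nil_of_length_lt rest (by omega)
  rw [e2, List.append_nil]

lemma pvFoldl_filter (sd : PySem.Dict String String) (f : List String → String) (p : List String → Bool) :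
    ∀ (l : List (List String)) (out : PySem.Set String),
      (∀ c ∈ l, p c = false → PySem.Dict.getD sd (f c) (f c) ∈ out) →
      l.foldl (fun o c => pvAdd sd o (f c)) out = (l.filter p).foldl (fun o c => pvAdd sd o (f c)) out := by
  intro l
  induction l with
  | nil => intro out _; simp
  | cons c l ih =>
    intro out h
    by_cases hp : p c = true
    · rw [List.foldl_cons, List.filter_cons_of_pos hp, List.foldl_cons]
      apply ih
      intro c' hc' hpc'
      have := h c' (List.mem_cons_of_mem _ hc') hpc'
      exact (PySem.Set.mem_add _ _ _).mpr (Or.inl this)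
    · have hfc : p c = false := by revert hp; cases p c <;> simp
      rw [List.foldl_cons, List.filter_cons_of_neg hp]
      have hmem := h c List.mem_cons_self hfc
      have hid : pvAdd sd out (f c) = out := PySem.Set.add_of_mem hmem
      rw [hid]
      exact ih out (fun c' hc' hpc' => h c' (List.mem_cons_of_mem _ hc') hpc')

lemma pvVal_perm (sep : String) {i m : String} {c T : List String} (h : (i :: c).Perm (m :: T)) :
    pvVal sep i c = pvVal sep m T := by
  unfold pvVal
  rw [PySem.List.sorted_eq_sorted_of_perm _ _ _ (fun a b e => e) h]

lemma pvSublist_tail {pre rest : List String} {h : String} {T : List String}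
    (nd : (pre ++ h :: rest).Nodup) (hs : (h :: T).Sublist (pre ++ h :: rest)) :
    T.Sublist rest := by
  rw [List.sublist_append_iff] at hs
  obtain ⟨l₁, l₂, heq, h1, h2⟩ := hs
  cases l₁ with
  | nil =>
    rw [List.nil_append] at heq
    rw [← heq] at h2
    exact List.cons_sublist_cons.mp h2
  | cons a l₁ =>
    rw [List.cons_append] at heq
    injection heq with hh _
    subst hh
    have hpre : h ∈ pre := h1.subset List.mem_cons_self
    have hdis := List.disjoint_of_nodup_append nd
    exact absurd hpre (fun hp => hdis hp List.mem_cons_self)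

-- invariant: the value of every subset of `items` whose earliest element lies in `pre` is present
def pvInv (sep : String) (sd : PySem.Dict String String) (items pre : List String) (out : PySem.Set String) : Prop :=
  ∀ m T, (m :: T).Sublist items → m ∈ pre →
    PySem.Dict.getD sd (pvVal sep m T) (pvVal sep m T) ∈ out

lemma pvMain (sep : String) (sd : PySem.Dict String String) :
    ∀ (suf pre : List String) (out : PySem.Set String),
      (pre ++ suf).Nodup →
      pvInv sep sd (pre ++ suf) pre out →
      suf.foldl (fun o i => pvInner sep sd i ((pre ++ suf).filter (fun x => x != i)) o) out
        = pvAltGo sep sd suf out := by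
  intro suf
  induction suf with
  | nil => intro pre out _ _; simp [pvAltGo]
  | cons h rest ih =>
    intro pre out nd inv
    have ndis : pre.Disjoint (h :: rest) := List.disjoint_of_nodup_append nd
    have hhpre : h ∉ pre := fun hp => ndis hp List.mem_cons_self
    have ndtail : (h :: rest).Nodup := (List.nodup_append.mp nd).2.1
    have hhrest : h ∉ rest := (List.nodup_cons.mp ndtail).1
    have ndrest' : (pre ++ rest).Nodup := by
      have hsb : List.Sublist (pre ++ rest) (pre ++ h :: rest) :=
        (List.append_sublist_append_left pre).mpr (List.sublist_cons_self h rest)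
      exact hsb.nodup nd
    have hdisj : ∀ a ∈ pre, a ∉ rest := fun a ha har => ndis ha (List.mem_cons_of_mem _ har)
    rw [List.foldl_cons]
    have hbody : pvInner sep sd h ((pre ++ h :: rest).filter (fun x => x != h)) out
        = pvAltHead sep sd h rest out := by
      rw [pvFilter_others pre rest h hhpre hhrest]
      rw [show pvAltHead sep sd h rest out = pvInner sep sd h rest out from
        pvInner_eq sep sd h rest out]
      unfold pvInner
      rw [← pvSubs_filter pre rest hdisj]
      apply pvFoldl_filter
      intro c hc hfalse
      have hcsub : List.Sublist c (pre ++ rest) := mem_pvSubs.mp hc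
      simp only [List.all_eq_false, decide_eq_true_eq] at hfalse
      obtain ⟨a, hac, har⟩ := hfalse
      have hapre : a ∈ pre := by
        rcases List.mem_append.mp (hcsub.subset hac) with h1 | h1
        · exact h1
        · exact absurd h1 har
      have hS : List.Sublist ((pre ++ h :: rest).filter (fun x => decide (x ∈ h :: c)))
          (pre ++ h :: rest) := List.filter_sublist
      have hndS : ((pre ++ h :: rest).filter (fun x => decide (x ∈ h :: c))).Nodup := hS.nodup nd
      have hnc : c.Nodup := hcsub.nodup ndrest'
      have hhc : h ∉ c := fun hcm =>
        (List.mem_append.mp (hcsub.subset hcm)).elim hhpre hhrest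
      have hndhc : (h :: c).Nodup := List.nodup_cons.mpr ⟨hhc, hnc⟩
      have hperm : ((pre ++ h :: rest).filter (fun x => decide (x ∈ h :: c))).Perm (h :: c) := by
        apply (List.perm_ext_iff_of_nodup hndS hndhc).mpr
        intro x
        simp only [List.mem_filter, decide_eq_true_eq]
        constructor
        · rintro ⟨-, hx⟩; exact hx
        · intro hx
          refine ⟨?_, hx⟩
          rcases List.mem_cons.mp hx with rfl | hxc
          · exact List.mem_append.mpr (Or.inr List.mem_cons_self)
          · exact List.mem_append.mpr
              ((List.mem_append.mp (hcsub.subset hxc)).imp id (List.mem_cons_of_mem _))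
      have hapq : a ∈ pre.filter (fun x => decide (x ∈ h :: c)) :=
        List.mem_filter.mpr ⟨hapre, by simp [List.mem_cons_of_mem _ hac]⟩
      cases hpq : pre.filter (fun x => decide (x ∈ h :: c)) with
      | nil => rw [hpq] at hapq; cases hapq
      | cons m T0 =>
        have hm : m ∈ pre := List.mem_of_mem_filter (by rw [hpq]; exact List.mem_cons_self)
        have hScons : (pre ++ h :: rest).filter (fun x => decide (x ∈ h :: c))
            = m :: (T0 ++ (h :: rest).filter (fun x => decide (x ∈ h :: c))) := by
          rw [List.filter_append, hpq, List.cons_append]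
        have hsubS : List.Sublist (m :: (T0 ++ (h :: rest).filter (fun x => decide (x ∈ h :: c))))
            (pre ++ h :: rest) := hScons ▸ hS
        have hinv := inv m _ hsubS hm
        have hval : pvVal sep m (T0 ++ (h :: rest).filter (fun x => decide (x ∈ h :: c)))
            = pvVal sep h c := by
          apply pvVal_perm
          rw [← hScons]
          exact hperm
        rw [hval] at hinv
        exact hinv
    rw [hbody]
    have nd' : ((pre ++ [h]) ++ rest).Nodup := by rwa [← List.append_cons]
    have inv' : pvInv sep sd ((pre ++ [h]) ++ rest) (pre ++ [h]) (pvAltHead sep sd h rest out) := by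
      intro m T hsub hm
      rw [show pvAltHead sep sd h rest out = pvInner sep sd h rest out from
        pvInner_eq sep sd h rest out]
      unfold pvInner pvAdd
      rw [PySem.Set.mem_foldl_add]
      have hsub' : List.Sublist (m :: T) (pre ++ h :: rest) := by rwa [List.append_cons]
      rcases List.mem_append.mp hm with hmp | hmh
      · left; exact inv m T hsub' hmp
      · have hmh' : m = h := by simpa using hmh
        subst hmh'
        right
        exact ⟨T, mem_pvSubs.mpr (pvSublist_tail nd hsub'), rfl⟩
    have hgo := ih (pre ++ [h]) (pvAltHead sep sd h rest out) nd' inv'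
    rw [← List.append_cons] at hgo
    rw [show pvAltGo sep sd (h :: rest) out = pvAltGo sep sd rest (pvAltHead sep sd h rest out)
      from rfl]
    exact hgo

-- ===== VERDICT (by name: the statement is the Claim_ definition above) =====
theorem build_combinations_py_spec : Claim_equal_build_combinations_py := by
  intro items separator solitary_display _ hpre
  unfold Spec_build_combinations_py build_combinations_py build_combinations_py_alt
  show items.foldl
      (fun out i =>
        (List.range ((items.filter (fun x => x != i)).length + 1)).foldl
          (fun out x =>
            (PySem.List.combinations (items.filter (fun x => x != i)) x).foldl
              (fun out c =>
                PySem.Set.add out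
                  (PySem.Dict.getD (PySem.Dict.mk (solitary_display.getD []))
                    (PySem.Str.join separator (PySem.List.sorted (i :: c) (fun s => s) false))
                    (PySem.Str.join separator (PySem.List.sorted (i :: c) (fun s => s) false))))
              out)
          out)
      (PySem.Set.ofList [""])
    = pvAltGo separator (PySem.Dict.mk (solitary_display.getD [])) items (PySem.Set.ofList [""])
  calc
    _ = items.foldl
          (fun o i => pvInner separator (PySem.Dict.mk (solitary_display.getD [])) i
            (items.filter (fun x => x != i)) o) (PySem.Set.ofList [""]) :=
      PySem.List.foldl_congr_mem _ _ _ _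
        (fun acc x _ => pvInner_eq separator (PySem.Dict.mk (solitary_display.getD [])) x
          (items.filter (fun y => y != x)) acc)
    _ = pvAltGo separator (PySem.Dict.mk (solitary_display.getD [])) items
          (PySem.Set.ofList [""]) := by
      have hmain := pvMain separator (PySem.Dict.mk (solitary_display.getD [])) items []
        (PySem.Set.ofList [""]) (by simpa using hpre)
        (fun m T _ hm => absurd hm List.not_mem_nil)
      simpa using hmain
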